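-- pv_equiv track=rewrite | github.com/martydill/Wizardry-6-reverse-engineering | scratch/investigate_ega.py | extract_planes_planar
-- ===== SOURCE A (Python) =====
-- def extract_planes_planar(data, w, h):
--     # Standard Planar: Plane 0 (all), Plane 1 (all)...
--     plane_size = (w * h) // 8
--     planes = []
--     for p in range(4):
--         p_data = data[p*plane_size : (p+1)*plane_size]
--         pixels = []
--         for b in p_data:
--             for i in range(8):
--                 pixels.append((b >> (7-i)) & 1)
--         planes.append(pixels)
--     return planes
-- ===== SOURCE B (Python) =====
-- # Alternative algorithm: pack each plane's slice into one big integer, then render all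
-- # its bits at once as a zero-padded binary string and map the characters to ints.
-- def extract_planes_planar(data, w, h):
--     plane_size = (w * h) // 8
--     planes = []
--     for p in range(4):
--         chunk = data[p * plane_size:(p + 1) * plane_size]
--         n = int.from_bytes(bytes((b & 0xFF) for b in chunk), 'big')
--         s = format(n, '0%db' % (8 * len(chunk))) if chunk else ''
--         planes.append([int(c) for c in s])
--     return planes
-- ===== Notes on version B (the rewrite author's own statement) =====
-- stated objective: alternative
-- what changed: Instead of nested per-byte/per-bit shift-and-mask loops, B packs each plane slice into a single big integer (int.from_bytes) and renders all of its bits at once as a zero-padded binary string, mapping characters to ints.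
import Mathlib
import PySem

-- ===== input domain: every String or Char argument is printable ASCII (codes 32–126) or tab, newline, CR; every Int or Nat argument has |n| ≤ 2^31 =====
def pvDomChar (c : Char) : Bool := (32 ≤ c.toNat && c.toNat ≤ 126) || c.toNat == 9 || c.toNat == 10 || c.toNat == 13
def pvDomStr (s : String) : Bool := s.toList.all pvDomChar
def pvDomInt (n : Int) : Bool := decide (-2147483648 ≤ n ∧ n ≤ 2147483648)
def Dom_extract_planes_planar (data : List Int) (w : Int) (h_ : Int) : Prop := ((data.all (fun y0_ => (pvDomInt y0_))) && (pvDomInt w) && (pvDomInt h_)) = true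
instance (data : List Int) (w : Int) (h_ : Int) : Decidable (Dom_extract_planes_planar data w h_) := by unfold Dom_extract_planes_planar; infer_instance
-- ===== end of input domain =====

-- B packs each plane slice into one big integer and renders all its bits at once as a
-- zero-padded binary string, instead of A's nested per-byte/per-bit shift-and-mask loops.

-- ===== PORT A =====
def extract_planes_planar (data : List Int) (w : Int) (h_ : Int) : List (List Int) :=
  let plane_size := PySem.Int.floordiv (w * h_) 8
  (List.range 4).foldl (fun planes p =>
    let p_data := PySem.List.slice data (some ((p : Int) * plane_size)) (some (((p : Int) + 1) * plane_size))
    let pixels := p_data.foldl (fun (px : List Int) (b : Int) =>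
      (List.range 8).foldl (fun (px2 : List Int) (i : Nat) => px2 ++ [PySem.Int.band (b >>> (7 - i)) 1]) px) ([] : List Int)
    planes ++ [pixels]) []

-- ===== PORT B =====
-- hand port of Python's format(n, '0Lb'): minimal binary digits of n (MSB first, '0' for n = 0),
-- left-padded with zeros to width L; exact for n ≥ 0 (the only values Source B formats)
def pvBinDigitsAux (n : Nat) (acc : List Int) : List Int :=
  if h : n = 0 then acc else pvBinDigitsAux (n / 2) (((n % 2 : Nat) : Int) :: acc)
  decreasing_by exact Nat.div_lt_self (Nat.pos_of_ne_zero h) (by norm_num)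

def pvDigits (n : Nat) : List Int :=
  if n = 0 then [(0 : Int)] else pvBinDigitsAux n []

def pvPadBin (n L : Nat) : List Int :=
  List.replicate (L - (pvDigits n).length) 0 ++ pvDigits n

def extract_planes_planar_alt (data : List Int) (w : Int) (h_ : Int) : List (List Int) :=
  let plane_size := PySem.Int.floordiv (w * h_) 8
  (List.range 4).foldl (fun planes p =>
    let chunk := PySem.List.slice data (some ((p : Int) * plane_size)) (some (((p : Int) + 1) * plane_size))
    let n := chunk.foldl (fun (n : Nat) (b : Int) => n * 256 + (PySem.Int.band b 255).toNat) 0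
    let bits := if chunk.isEmpty then ([] : List Int) else pvPadBin n (8 * chunk.length)
    planes ++ [bits]) []

-- ===== PRECONDITION & SPEC =====
def Spec_extract_planes_planar (data : List Int) (w : Int) (h_ : Int) (out : List (List Int)) : Prop := out = extract_planes_planar_alt data w h_
instance (data : List Int) (w : Int) (h_ : Int) (out : List (List Int)) : Decidable (Spec_extract_planes_planar data w h_ out) := by unfold Spec_extract_planes_planar; infer_instance

-- ===== CLAIM (what is proved, stated in full; the proofs are below) =====
def Claim_equal_extract_planes_planar : Prop := ∀ (data : List Int) (w : Int) (h_ : Int), Dom_extract_planes_planar data w h_ → Spec_extract_planes_planar data w h_ (extract_planes_planar data w h_)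

-- ===== LEMMAS AND PROOFS =====

-- the MSB-first 8 bits of byte b, as A's inner loop produces them
def pvByteBits (b : Int) : List Int :=
  (List.range 8).map (fun (i : Nat) => PySem.Int.band (b >>> (7 - i)) 1)

-- the L bits of n, MSB first
def pvBitsRange (n L : Nat) : List Int :=
  (List.range L).map (fun k => (((n >>> (L - 1 - k)) &&& 1 : Nat) : Int))

lemma foldl_concat_map {α β : Type} (f : α → β) (l : List α) (init : List β) :
    l.foldl (fun acc x => acc ++ [f x]) init = init ++ l.map f := by
  induction l generalizing init with
  | nil => simp
  | cons a l ih => simp [List.foldl, ih]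

lemma foldl_append_flatMap {α β : Type} (g : α → List β) (l : List α) (init : List β) :
    l.foldl (fun acc x => acc ++ g x) init = init ++ l.flatMap g := by
  induction l generalizing init with
  | nil => simp
  | cons a l ih => simp [List.foldl, ih]

lemma band255 (b : Int) : PySem.Int.band b 255 = b % 256 := by
  unfold PySem.Int.band
  split_ifs with h1 h2 h2
  · rw [show (255:Int).toNat = 255 from rfl, Nat.and_two_pow_sub_one_eq_mod b.toNat 8]
    have := Nat.mod_lt b.toNat (show 0 < 2^8 by norm_num)
    push_cast; omega
  · omega
  · rw [show (255:Int).toNat = 255 from rfl,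
      show ∀ x:Nat, 255 &&& x = x &&& 255 from fun x => Nat.and_comm 255 x,
      Nat.and_two_pow_sub_one_eq_mod ((-b-1).toNat) 8]
    have := Nat.mod_lt (-b-1).toNat (show 0 < 2^8 by norm_num)
    push_cast
    omega
  · omega

lemma band1 (b : Int) : PySem.Int.band b 1 = b % 2 := by
  unfold PySem.Int.band
  split_ifs with h1 h2 h2
  · rw [show (1:Int).toNat = 1 from rfl, Nat.and_one_is_mod]
    push_cast; omega
  · omega
  · rw [show (1:Int).toNat = 1 from rfl,
      show ∀ x:Nat, 1 &&& x = x &&& 1 from fun x => Nat.and_comm 1 x, Nat.and_one_is_mod]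
    omega
  · omega

-- the bits of b % 256 are the low 8 bits of b
lemma bit_mod256 (b : Int) (k : Nat) (hk : k < 8) :
    (((((b % 256).natAbs >>> k) &&& 1 : Nat) : Int)) = PySem.Int.band (b >>> k) 1 := by
  rw [band1, Int.shiftRight_eq_div_pow, Nat.shiftRight_eq_div_pow, Nat.and_one_is_mod,
    Int.natCast_mod, Int.natCast_div, Int.natCast_pow]
  have hcast : ((b % 256).natAbs : Int) = b % 256 := by omega
  rw [hcast]
  interval_cases k <;> norm_num <;> omega

lemma byteBits_eq (b : Int) : pvBitsRange (PySem.Int.band b 255).toNat 8 = pvByteBits b := by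
  unfold pvBitsRange pvByteBits
  refine List.map_congr_left (fun i hi => ?_)
  have hi8 : i < 8 := List.mem_range.mp hi
  have hmod : (PySem.Int.band b 255).toNat = (b % 256).natAbs := by
    rw [band255]
    have : 0 ≤ b % 256 := Int.emod_nonneg b (by norm_num)
    omega
  rw [hmod, show 8 - 1 - i = 7 - i from by omega]
  exact bit_mod256 b (7 - i) (by omega)

lemma bitsRange_split (n r L : Nat) (hr : r < 256) :
    pvBitsRange (n * 256 + r) (L + 8) = pvBitsRange n L ++ pvBitsRange r 8 := by
  unfold pvBitsRange
  rw [List.range_add, List.map_append, List.map_map]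
  congr 1
  · refine List.map_congr_left (fun k hk => ?_)
    have hkL : k < L := List.mem_range.mp hk
    have hsh : (n * 256 + r) >>> ((L - 1 - k) + 8) = n >>> (L - 1 - k) := by
      rw [Nat.shiftRight_eq_div_pow, Nat.shiftRight_eq_div_pow, pow_add,
        mul_comm ((2:Nat) ^ (L - 1 - k)) _, ← Nat.div_div_eq_div_mul]
      congr 1
      have h256 : (2:Nat) ^ 8 = 256 := by norm_num
      rw [h256]
      omega
    rw [show L + 8 - 1 - k = (L - 1 - k) + 8 from by omega, hsh]
  · refine List.map_congr_left (fun j hj => ?_)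
    have hj8 : j < 8 := List.mem_range.mp hj
    simp only [Function.comp]
    rw [show L + 8 - 1 - (L + j) = 7 - j from by omega]
    congr 1
    rw [Nat.shiftRight_eq_div_pow, Nat.shiftRight_eq_div_pow, Nat.and_one_is_mod, Nat.and_one_is_mod]
    interval_cases j <;> omega

lemma binDigitsAux_zero (acc : List Int) : pvBinDigitsAux 0 acc = acc := by
  rw [pvBinDigitsAux]; simp

lemma pvDigits_zero : pvDigits 0 = [0] := by
  unfold pvDigits; simp

lemma binDigitsAux_acc (n : Nat) (acc : List Int) (hn : 0 < n) :
    pvBinDigitsAux n acc = pvBinDigitsAux n [] ++ acc := by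
  induction n using Nat.strong_induction_on generalizing acc with
  | _ n ih =>
    conv_lhs => rw [pvBinDigitsAux]
    conv_rhs => rw [pvBinDigitsAux]
    simp only [dif_neg (Nat.pos_iff_ne_zero.mp hn)]
    by_cases h2 : n / 2 = 0
    · rw [h2, binDigitsAux_zero, binDigitsAux_zero]; simp
    · rw [ih (n / 2) (Nat.div_lt_self hn (by norm_num)) _ (Nat.pos_of_ne_zero h2),
        ih (n / 2) (Nat.div_lt_self hn (by norm_num)) [((n % 2 : Nat) : Int)] (Nat.pos_of_ne_zero h2)]
      simp

lemma pvDigits_one : pvDigits 1 = [1] := by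
  unfold pvDigits
  rw [if_neg one_ne_zero, pvBinDigitsAux]
  norm_num [binDigitsAux_zero]

lemma dig_eq (n : Nat) (hn : 2 ≤ n) :
    pvDigits n = pvDigits (n / 2) ++ [((n % 2 : Nat) : Int)] := by
  unfold pvDigits
  rw [if_neg (by omega : n ≠ 0), if_neg (by omega : n / 2 ≠ 0)]
  conv_lhs => rw [pvBinDigitsAux]
  rw [dif_neg (by omega : n ≠ 0)]
  exact binDigitsAux_acc (n / 2) _ (by omega)

lemma padBin_succ (n L : Nat) (hL : 1 ≤ L) :
    pvPadBin n (L + 1) = pvPadBin (n / 2) L ++ [((n % 2 : Nat) : Int)] := by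
  unfold pvPadBin
  by_cases h2 : n ≤ 1
  · have hd : pvDigits (n / 2) = [(0 : Int)] := by
      rw [show n / 2 = 0 from by omega, pvDigits_zero]
    have hdn : pvDigits n = [((n % 2 : Nat) : Int)] := by
      interval_cases n
      · rw [pvDigits_zero]; norm_num
      · rw [pvDigits_one]; norm_num
    rw [hd, hdn]
    simp only [List.length_singleton]
    rw [show L + 1 - 1 = (L - 1) + 1 from by omega, List.replicate_succ']
  · rw [dig_eq n (by omega), List.length_append, List.length_singleton,
      show L + 1 - ((pvDigits (n / 2)).length + 1) = L - (pvDigits (n / 2)).length from by omega,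
      ← List.append_assoc]

lemma bitsRange_succ (n L : Nat) :
    pvBitsRange n (L + 1) = pvBitsRange (n / 2) L ++ [((n % 2 : Nat) : Int)] := by
  unfold pvBitsRange
  rw [show L + 1 = L + 1 from rfl, List.range_succ, List.map_append]
  congr 1
  · refine List.map_congr_left (fun k hk => ?_)
    have hkL : k < L := List.mem_range.mp hk
    rw [show L + 1 - 1 - k = 1 + (L - 1 - k) from by omega, Nat.shiftRight_add,
      Nat.shiftRight_one]
  · simp [Nat.and_one_is_mod]

lemma padBin_eq_bitsRange (L : Nat) (hL : 1 ≤ L) : ∀ n, n < 2 ^ L → pvPadBin n L = pvBitsRange n L := by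
  induction L with
  | zero => omega
  | succ L ih =>
    intro n hn
    by_cases hL1 : L = 0
    · subst hL1
      interval_cases n
      · show pvPadBin 0 1 = pvBitsRange 0 1
        rw [show pvPadBin 0 1 = [0] from by unfold pvPadBin; rw [pvDigits_zero]; norm_num]
        simp [pvBitsRange, List.range_one]
      · show pvPadBin 1 1 = pvBitsRange 1 1
        rw [show pvPadBin 1 1 = [1] from by unfold pvPadBin; rw [pvDigits_one]; norm_num]
        simp [pvBitsRange, List.range_one]
    · rw [padBin_succ n L (by omega), bitsRange_succ n L,
        ih (by omega) (n / 2) (by rw [pow_succ] at hn; omega)]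

-- the per-plane equivalence: big-integer bits = concatenated per-byte bits
lemma chunk_bits (chunk : List Int) :
    pvBitsRange (chunk.foldl (fun (n : Nat) (b : Int) => n * 256 + (PySem.Int.band b 255).toNat) 0) (8 * chunk.length)
      = chunk.flatMap pvByteBits := by
  induction chunk using List.reverseRecOn with
  | nil => simp [pvBitsRange]
  | append_singleton xs b ih =>
    have hb : (PySem.Int.band b 255).toNat < 256 := by
      rw [band255]
      have := Int.emod_lt_of_pos b (show (0:Int) < 256 by norm_num)
      have := Int.emod_nonneg b (show (256:Int) ≠ 0 by norm_num)
      omega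
    rw [List.foldl_append, List.foldl_cons, List.foldl_nil, List.flatMap_append,
      List.length_append, List.length_singleton, show 8 * (xs.length + 1) = 8 * xs.length + 8 from by ring,
      bitsRange_split _ _ _ hb, ih, byteBits_eq]
    simp

lemma chunk_bound (chunk : List Int) :
    chunk.foldl (fun (n : Nat) (b : Int) => n * 256 + (PySem.Int.band b 255).toNat) 0 < 2 ^ (8 * chunk.length) := by
  induction chunk using List.reverseRecOn with
  | nil => simp
  | append_singleton xs b ih =>
    rw [List.foldl_append, List.foldl_cons, List.foldl_nil, List.length_append,
      List.length_singleton, show 8 * (xs.length + 1) = 8 * xs.length + 8 from by ring, pow_add]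
    have hb : (PySem.Int.band b 255).toNat < 256 := by
      rw [band255]
      have := Int.emod_lt_of_pos b (show (0:Int) < 256 by norm_num)
      have := Int.emod_nonneg b (show (256:Int) ≠ 0 by norm_num)
      omega
    have : (2:Nat) ^ 8 = 256 := by norm_num
    nlinarith [ih]

lemma plane_eq (chunk : List Int) :
    (if chunk.isEmpty then ([] : List Int)
     else pvPadBin (chunk.foldl (fun (n : Nat) (b : Int) => n * 256 + (PySem.Int.band b 255).toNat) 0) (8 * chunk.length))
      = chunk.flatMap pvByteBits := by
  cases chunk with
  | nil => simp
  | cons a xs =>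
    rw [List.isEmpty_cons, if_neg (by simp)]
    rw [padBin_eq_bitsRange (8 * (a :: xs).length) (by simp; omega) _ (chunk_bound (a :: xs))]
    exact chunk_bits (a :: xs)

-- ===== VERDICT (by name: the statement is the Claim_ definition above) =====
theorem extract_planes_planar_spec : Claim_equal_extract_planes_planar := by
  intro data w h_ _
  simp only [Spec_extract_planes_planar, extract_planes_planar, extract_planes_planar_alt]
  apply PySem.List.foldl_congr_mem
  intro planes p _
  congr 1
  set chunk := PySem.List.slice data (some ((p : Int) * PySem.Int.floordiv (w * h_) 8))
      (some (((p : Int) + 1) * PySem.Int.floordiv (w * h_) 8)) with hchunk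
  have hA : chunk.foldl (fun (px : List Int) (b : Int) =>
      (List.range 8).foldl (fun (px2 : List Int) (i : Nat) => px2 ++ [PySem.Int.band (b >>> (7 - i)) 1]) px) ([] : List Int)
      = chunk.flatMap pvByteBits := by
    have hfun : (fun (px : List Int) (b : Int) =>
        (List.range 8).foldl (fun (px2 : List Int) (i : Nat) => px2 ++ [PySem.Int.band (b >>> (7 - i)) 1]) px)
        = fun px b => px ++ pvByteBits b := by
      funext px b
      rw [foldl_concat_map (fun i : Nat => PySem.Int.band (b >>> (7 - i)) 1) (List.range 8) px]
      rfl
    rw [hfun, foldl_append_flatMap, List.nil_append]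
  rw [hA, ← plane_eq chunk]
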